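-- pv_equiv track=rewrite | github.com/nazirabolat/PP2Summer2020 | L.py | isBacktoHome
-- ===== SOURCE A (Python) =====
-- def isBacktoHome(comands):
-- 	x, y = 0, 0
-- 	for comand in comands:
-- 		if comand == 'U':
-- 			x += 1
-- 		elif comand == 'D':
-- 			x -= 1
-- 		elif comand == 'L':
-- 			y += 1
-- 		elif comand == 'R':
-- 			y -= 1
-- 	return x == y == 0
-- ===== SOURCE B (Python) =====
-- def isBacktoHome(comands):
-- 	return comands.count('U') == comands.count('D') and comands.count('L') == comands.count('R')
-- ===== Notes on version B (the rewrite author's own statement) =====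
-- stated objective: idiomatic
-- what changed: Replaces the per-character branch-and-accumulate loop over two integer deltas with a frequency-table formulation: count each direction with str.count and compare U==D and L==R.
import Mathlib
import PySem

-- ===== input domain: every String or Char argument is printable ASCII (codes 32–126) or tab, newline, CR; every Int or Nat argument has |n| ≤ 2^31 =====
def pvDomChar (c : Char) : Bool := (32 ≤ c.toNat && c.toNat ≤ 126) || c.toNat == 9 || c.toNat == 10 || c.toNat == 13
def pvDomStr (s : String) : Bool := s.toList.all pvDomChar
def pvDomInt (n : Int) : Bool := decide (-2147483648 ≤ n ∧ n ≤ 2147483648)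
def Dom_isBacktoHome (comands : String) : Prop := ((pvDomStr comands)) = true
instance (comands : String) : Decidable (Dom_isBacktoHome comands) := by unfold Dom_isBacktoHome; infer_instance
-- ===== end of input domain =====

-- B replaces A's per-character branch-and-accumulate loop by counting each direction and comparing U=D and L=R (idiomatic frequency-table form).

-- ===== PORT A =====
-- the loop body: branch on the command, update the (x, y) accumulator
def isBacktoHomeStep (p : Int × Int) (comand : Char) : Int × Int :=
  if comand = 'U' then (p.1 + 1, p.2)
  else if comand = 'D' then (p.1 - 1, p.2)
  else if comand = 'L' then (p.1, p.2 + 1)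
  else if comand = 'R' then (p.1, p.2 - 1)
  else p

def isBacktoHome (comands : String) : Bool :=
  let p := comands.toList.foldl isBacktoHomeStep (0, 0)
  -- Python's chained comparison `x == y == 0`
  p.1 == p.2 && p.2 == 0

-- ===== PORT B =====
def isBacktoHome_alt (comands : String) : Bool :=
  PySem.Str.count comands "U" == PySem.Str.count comands "D" &&
  PySem.Str.count comands "L" == PySem.Str.count comands "R"

-- ===== PRECONDITION & SPEC =====
def Spec_isBacktoHome (comands : String) (out : Bool) : Prop := out = isBacktoHome_alt comands
instance (comands : String) (out : Bool) : Decidable (Spec_isBacktoHome comands out) := by unfold Spec_isBacktoHome; infer_instance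

-- ===== CLAIM (what is proved, stated in full; the proofs are below) =====
def Claim_equal_isBacktoHome : Prop := ∀ (comands : String), Dom_isBacktoHome comands → Spec_isBacktoHome comands (isBacktoHome comands)

-- ===== LEMMAS AND PROOFS =====

-- Python's s.count('c') for a one-character needle is the character count
theorem chars_count_singleton (c : Char) (l : List Char) :
    PySem.Chars.count l [c] = l.count c := by
  have go : ∀ (l : List Char) (fuel acc : Nat), l.length ≤ fuel →
      PySem.Chars.count.go [c] fuel l acc = acc + l.count c := by
    intro l
    induction l with
    | nil => intro fuel acc _; cases fuel <;> simp [PySem.Chars.count.go]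
    | cons h t ih =>
      intro fuel acc hf
      cases fuel with
      | zero => simp at hf
      | succ n =>
        by_cases hc : h = c
        · simp [PySem.Chars.count.go, hc, List.isPrefixOf,
            ih n (acc + 1) (by simpa using hf)]
          omega
        · simp [PySem.Chars.count.go, List.isPrefixOf, beq_iff_eq,
            Ne.symm hc, ih n acc (by simpa using hf), hc]
  simp [PySem.Chars.count, go l l.length 0 le_rfl]

theorem foldl_step (l : List Char) (x y : Int) :
    l.foldl isBacktoHomeStep (x, y) =
      (x + l.count 'U' - l.count 'D', y + l.count 'L' - l.count 'R') := by
  induction l generalizing x y with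
  | nil => simp
  | cons h t ih =>
    by_cases h1 : h = 'U'
    · simp [isBacktoHomeStep, h1, ih]; omega
    · by_cases h2 : h = 'D'
      · simp [isBacktoHomeStep, h2, ih]; omega
      · by_cases h3 : h = 'L'
        · simp [isBacktoHomeStep, h3, ih]; omega
        · by_cases h4 : h = 'R'
          · simp [isBacktoHomeStep, h4, ih]; omega
          · simp [isBacktoHomeStep, h1, h2, h3, h4, ih]

-- ===== VERDICT (by name: the statement is the Claim_ definition above) =====
theorem isBacktoHome_spec : Claim_equal_isBacktoHome := by
  intro comands _
  unfold Spec_isBacktoHome isBacktoHome isBacktoHome_alt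
  rw [foldl_step]
  have hc : ∀ c : Char, PySem.Str.count comands (String.ofList [c]) = comands.toList.count c := by
    intro c
    rw [PySem.Str.count_eq]
    have h1 : (String.ofList [c]).toList = [c] := by simp
    rw [h1, chars_count_singleton]
  rw [show ("U" : String) = String.ofList ['U'] from rfl,
      show ("D" : String) = String.ofList ['D'] from rfl,
      show ("L" : String) = String.ofList ['L'] from rfl,
      show ("R" : String) = String.ofList ['R'] from rfl,
      hc, hc, hc, hc]
  rw [Bool.eq_iff_iff]
  simp only [Bool.and_eq_true, beq_iff_eq]
  omega
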